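-- pv_equiv track=rewrite | github.com/moqiguzhu/Online-Judge | leetcode-python/weeklycontest150/maxDistance.py | maxDistance2
-- ===== SOURCE A (Python) =====
-- from typing import List
-- from collections import deque
--
-- def maxDistance2(grid: List[List[int]]) -> int:
--     n1, n2 = len(grid), len(grid[0])
--     t = sum([sum(e) for e in grid])
--     if t == (n1) * (n2) or t == 0:
--         return -1
--
--     q = deque()
--     n1 = len(grid)
--     n2 = len(grid[0])
--
--     cur_d = 1
--     for i in range(n1):
--         for j in range(n2):
--             if grid[i][j] == 0:
--                 q.append((i, j))
--     while len(q) > 0: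
--         t = deque()
--         for e in q:
--             tt = []
--             for l in range(0, cur_d+1, 1):
--                 tt.append((e[0]-l, e[1]-(cur_d-l)))
--                 tt.append((e[0]-l, e[1]+(cur_d-l)))
--                 tt.append((e[0]+l, e[1]-(cur_d-l)))
--                 tt.append((e[0]+l, e[1]+(cur_d-l)))
--             flag = True
--             for idx1, idx2 in tt:
--                 if idx1 >= 0 and idx1 < n1 and idx2 >= 0 and idx2 < n2 and grid[idx1][idx2] == 1:
--                     flag = False
--                     break
--             if flag:
--                 t.append(e)
--         q = t
--         cur_d += 1
--
--     return cur_d - 1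
-- ===== SOURCE B (Python) =====
-- from typing import List
--
-- def maxDistance2(grid: List[List[int]]) -> int:
--     # Direct formula: answer = max over water cells of the Manhattan distance
--     # to the nearest land cell (no ring-expansion rounds).
--     n1, n2 = len(grid), len(grid[0])
--     t = sum(sum(e) for e in grid)
--     if t == n1 * n2 or t == 0:
--         return -1
--     land = [(i, j) for i in range(n1) for j in range(n2) if grid[i][j] == 1]
--     water = [(i, j) for i in range(n1) for j in range(n2) if grid[i][j] == 0]
--     if not water:
--         return 0
--     return max(min(abs(i - x) + abs(j - y) for x, y in land) for i, j in water)
-- ===== Notes on version B (the rewrite author's own statement) =====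
-- stated objective: simpler
-- what changed: A runs ring-expansion rounds that repeatedly rescan surviving water cells against growing Manhattan rings until the queue empties; B computes the answer directly as the max over water cells of the min Manhattan distance to a land cell, with no iterative elimination loop.
-- outside the precondition, e.g. on maxDistance2([[0, 3]]): A does not finish within the time limit, B raises ValueError; on maxDistance2([[1], []]): A raises IndexError, B raises IndexError
import Mathlib
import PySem

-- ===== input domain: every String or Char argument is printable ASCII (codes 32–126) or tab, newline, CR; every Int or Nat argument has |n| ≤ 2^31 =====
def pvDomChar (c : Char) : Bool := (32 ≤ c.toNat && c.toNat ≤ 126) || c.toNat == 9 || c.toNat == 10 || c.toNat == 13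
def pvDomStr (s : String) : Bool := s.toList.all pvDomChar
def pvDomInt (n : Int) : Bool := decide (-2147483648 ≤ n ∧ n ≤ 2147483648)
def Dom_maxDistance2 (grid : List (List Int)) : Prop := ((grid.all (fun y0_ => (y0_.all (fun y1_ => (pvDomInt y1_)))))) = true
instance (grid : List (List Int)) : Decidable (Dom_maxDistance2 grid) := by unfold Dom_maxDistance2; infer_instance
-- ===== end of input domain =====

-- B replaces A's ring-expansion elimination rounds by a direct max-over-water of
-- min-Manhattan-distance-to-land formula (objective: simpler).


-- ===== PORT A =====
-- grid[i][j]; exact whenever 0 ≤ i < len(grid) and 0 ≤ j ≤ len(grid[i]) guard the access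
def pvCell (grid : List (List Int)) (i j : Int) : Int :=
  PySem.List.pyGetD (PySem.List.pyGetD grid i []) j 0

-- the bounds-and-land test of A's inner for-loop body
def pvLandAt (grid : List (List Int)) (n1 n2 : Int) (p : Int × Int) : Bool :=
  decide (0 ≤ p.1) && decide (p.1 < n1) && decide (0 ≤ p.2) && decide (p.2 < n2) &&
    (pvCell grid p.1 p.2 == 1)

-- the list tt built for a cell e at distance d (for l in range(0, d+1, 1): four appends)
def pvRing (e : Int × Int) (d : Int) : List (Int × Int) :=
  (PySem.List.pyRange 0 (d+1) 1).foldl (fun tt l =>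
    tt ++ [(e.1 - l, e.2 - (d - l)), (e.1 - l, e.2 + (d - l)),
           (e.1 + l, e.2 - (d - l)), (e.1 + l, e.2 + (d - l))]) []

-- the while loop; fuel only makes it total (A diverges outside Pre_; fuel suffices inside)
def pvLoopA (grid : List (List Int)) (n1 n2 : Int) : Nat → List (Int × Int) → Int → Int
  | 0, _, cur_d => cur_d - 1
  | f+1, q, cur_d =>
    if q.length > 0 then
      pvLoopA grid n1 n2 f
        (q.filter (fun e => !((pvRing e cur_d).any (pvLandAt grid n1 n2)))) (cur_d + 1)
    else cur_d - 1

def maxDistance2 (grid : List (List Int)) : Int :=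
  let n1 : Int := grid.length
  let n2 : Int := (grid.headD []).length  -- grid[0]; Pre_ excludes the empty grid (IndexError)
  let t : Int := (grid.map (fun e => e.sum)).sum
  if t = n1 * n2 ∨ t = 0 then -1
  else
    let q := (PySem.List.pyRange 0 n1 1).foldl (fun acc i =>
        (PySem.List.pyRange 0 n2 1).foldl (fun acc j =>
          if pvCell grid i j = 0 then acc ++ [(i, j)] else acc) acc) []
    pvLoopA grid n1 n2 (n1 + n2).toNat q 1

-- ===== PORT B =====
-- abs(x) on Python ints
def pvAbsI (x : Int) : Int := if x < 0 then -x else x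

-- the comprehension [(i, j) for i in range(n1) for j in range(n2) if grid[i][j] == v]
def pvCellsOf (grid : List (List Int)) (n1 n2 v : Int) : List (Int × Int) :=
  (PySem.List.pyRange 0 n1 1).flatMap (fun i =>
    ((PySem.List.pyRange 0 n2 1).filter (fun j => pvCell grid i j == v)).map (fun j => (i, j)))

def maxDistance2_alt (grid : List (List Int)) : Int :=
  let n1 : Int := grid.length
  let n2 : Int := (grid.headD []).length  -- grid[0]; Pre_ excludes the empty grid (IndexError)
  let t : Int := (grid.map (fun e => e.sum)).sum
  if t = n1 * n2 ∨ t = 0 then -1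
  else
    let land := pvCellsOf grid n1 n2 1
    let water := pvCellsOf grid n1 n2 0
    if water = [] then 0
    else
      -- min/max over nonempty lists under Pre_ (land ≠ [] there); the default is never used
      (PySem.List.max? (water.map (fun w =>
        (PySem.List.min? (land.map (fun l => pvAbsI (w.1 - l.1) + pvAbsI (w.2 - l.2)))
          (fun x => x)).getD 0)) (fun x => x)).getD 0

-- ===== PRECONDITION & SPEC =====
-- Pre_ excludes: the empty grid and grids with a row shorter than row 0 (A raises IndexError),
-- and grids whose first-len(grid[0]) columns contain a 0-cell but no 1-cell while the total sum
-- is neither 0 nor n1*n2 (A's while loop never terminates there).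
def Pre_maxDistance2 (grid : List (List Int)) : Prop :=
  grid ≠ [] ∧
  (∀ row ∈ grid, (grid.headD []).length ≤ row.length) ∧
  ((grid.map (fun e => e.sum)).sum ≠ 0 →
   (grid.map (fun e => e.sum)).sum ≠ (grid.length : Int) * ((grid.headD []).length : Int) →
   (∃ i < grid.length, ∃ j < (grid.headD []).length, (grid.getD i []).getD j 0 = 0) →
   (∃ i < grid.length, ∃ j < (grid.headD []).length, (grid.getD i []).getD j 0 = 1))
instance (grid : List (List Int)) : Decidable (Pre_maxDistance2 grid) := by
  unfold Pre_maxDistance2; infer_instance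
def pvWitness_maxDistance2 : List (List Int) := [[1, 0], [0, 0]]
def Spec_maxDistance2 (grid : List (List Int)) (out : Int) : Prop := out = maxDistance2_alt grid
instance (grid : List (List Int)) (out : Int) : Decidable (Spec_maxDistance2 grid out) := by unfold Spec_maxDistance2; infer_instance

-- ===== CLAIM (what is proved, stated in full; the proofs are below) =====
def Claim_equal_maxDistance2 : Prop := ∀ (grid : List (List Int)), Dom_maxDistance2 grid → Pre_maxDistance2 grid → Spec_maxDistance2 grid (maxDistance2 grid)

-- ===== LEMMAS AND PROOFS =====

-- distance-to-nearest-land, as B computes it (proof-side name for B's inner expression)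
def pvDmin (grid : List (List Int)) (n1 n2 : Int) (w : Int × Int) : Int :=
  (PySem.List.min? ((pvCellsOf grid n1 n2 1).map
    (fun l => pvAbsI (w.1 - l.1) + pvAbsI (w.2 - l.2))) (fun x => x)).getD 0

theorem mem_pvCellsOf (grid : List (List Int)) (n1 n2 v : Int) (p : Int × Int) :
    p ∈ pvCellsOf grid n1 n2 v ↔
      0 ≤ p.1 ∧ p.1 < n1 ∧ 0 ≤ p.2 ∧ p.2 < n2 ∧ pvCell grid p.1 p.2 = v := by
  simp only [pvCellsOf, List.mem_flatMap, List.mem_map, List.mem_filter,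
    PySem.List.mem_pyRange_one, beq_iff_eq]
  constructor
  · rintro ⟨i, ⟨hi0, hi1⟩, j, ⟨⟨hj0, hj1⟩, hc⟩, rfl⟩
    exact ⟨hi0, hi1, hj0, hj1, hc⟩
  · rintro ⟨h1, h2, h3, h4, h5⟩
    exact ⟨p.1, ⟨h1, h2⟩, p.2, ⟨⟨h3, h4⟩, h5⟩, rfl⟩

theorem pvLandAt_iff (grid : List (List Int)) (n1 n2 : Int) (p : Int × Int) :
    pvLandAt grid n1 n2 p = true ↔ p ∈ pvCellsOf grid n1 n2 1 := by
  simp [pvLandAt, mem_pvCellsOf, and_assoc]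

theorem mem_pvRing (e : Int × Int) (d : Int) (q : Int × Int) :
    q ∈ pvRing e d ↔ ∃ l, 0 ≤ l ∧ l < d + 1 ∧
      (q = (e.1 - l, e.2 - (d - l)) ∨ q = (e.1 - l, e.2 + (d - l)) ∨
       q = (e.1 + l, e.2 - (d - l)) ∨ q = (e.1 + l, e.2 + (d - l))) := by
  unfold pvRing
  rw [PySem.List.foldl_append_eq_flatMap]
  simp only [List.nil_append, List.mem_flatMap, PySem.List.mem_pyRange_one,
    List.mem_cons, List.not_mem_nil, or_false]
  constructor
  · rintro ⟨l, ⟨h0, h1⟩, h⟩; exact ⟨l, h0, h1, h⟩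
  · rintro ⟨l, h0, h1, h⟩; exact ⟨l, ⟨h0, h1⟩, h⟩

theorem mem_pvRing_iff_dist (e : Int × Int) (d : Int) (hd : 0 ≤ d) (q : Int × Int) :
    q ∈ pvRing e d ↔ pvAbsI (e.1 - q.1) + pvAbsI (e.2 - q.2) = d := by
  rw [mem_pvRing]
  constructor
  · rintro ⟨l, h0, h1, h | h | h | h⟩ <;>
      (subst h; simp only [pvAbsI]; split_ifs <;> omega)
  · intro h
    refine ⟨pvAbsI (e.1 - q.1), ?_, ?_, ?_⟩
    · simp only [pvAbsI]; split_ifs <;> omega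
    · simp only [pvAbsI] at h ⊢; split_ifs at h ⊢ <;> omega
    · simp only [Prod.ext_iff, pvAbsI] at h ⊢
      split_ifs at h ⊢ <;> omega

theorem any_ring_iff (grid : List (List Int)) (n1 n2 : Int) (e : Int × Int) (d : Int)
    (hd : 0 ≤ d) :
    ((pvRing e d).any (pvLandAt grid n1 n2) = true) ↔
      ∃ p ∈ pvCellsOf grid n1 n2 1, pvAbsI (e.1 - p.1) + pvAbsI (e.2 - p.2) = d := by
  simp only [List.any_eq_true]
  constructor
  · rintro ⟨p, hp, hl⟩
    exact ⟨p, (pvLandAt_iff grid n1 n2 p).1 hl, (mem_pvRing_iff_dist e d hd p).1 hp⟩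
  · rintro ⟨p, hp, hdist⟩
    exact ⟨p, (mem_pvRing_iff_dist e d hd p).2 hdist, (pvLandAt_iff grid n1 n2 p).2 hp⟩

theorem pvDmin_spec (grid : List (List Int)) (n1 n2 : Int) (w : Int × Int)
    (hL : pvCellsOf grid n1 n2 1 ≠ []) :
    (∃ p ∈ pvCellsOf grid n1 n2 1, pvAbsI (w.1 - p.1) + pvAbsI (w.2 - p.2) = pvDmin grid n1 n2 w) ∧
    (∀ p ∈ pvCellsOf grid n1 n2 1, pvDmin grid n1 n2 w ≤ pvAbsI (w.1 - p.1) + pvAbsI (w.2 - p.2)) := by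
  have hmap : (pvCellsOf grid n1 n2 1).map
      (fun l => pvAbsI (w.1 - l.1) + pvAbsI (w.2 - l.2)) ≠ [] := by
    simpa using hL
  rcases hm : PySem.List.min? ((pvCellsOf grid n1 n2 1).map
      (fun l => pvAbsI (w.1 - l.1) + pvAbsI (w.2 - l.2))) (fun x => x) with _ | m
  · exact absurd ((PySem.List.min?_eq_none_iff _ _).mp hm) hmap
  · have hmem := PySem.List.min?_mem hm
    have hmin := PySem.List.min?_isMin hm
    have hout : pvDmin grid n1 n2 w = m := by simp [pvDmin, hm]
    rw [hout]
    constructor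
    · rcases List.mem_map.mp hmem with ⟨p, hp, hpe⟩
      exact ⟨p, hp, hpe⟩
    · intro p hp
      exact hmin _ (List.mem_map.mpr ⟨p, hp, rfl⟩)

theorem pvDmin_pos (grid : List (List Int)) (n1 n2 : Int) (w : Int × Int)
    (hw : w ∈ pvCellsOf grid n1 n2 0) (hL : pvCellsOf grid n1 n2 1 ≠ []) :
    1 ≤ pvDmin grid n1 n2 w := by
  obtain ⟨⟨p, hp, hpe⟩, -⟩ := pvDmin_spec grid n1 n2 w hL
  rw [← hpe]
  have hw' := (mem_pvCellsOf grid n1 n2 0 w).mp hw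
  have hp' := (mem_pvCellsOf grid n1 n2 1 p).mp hp
  have hne : w.1 ≠ p.1 ∨ w.2 ≠ p.2 := by
    by_contra hc
    push_neg at hc
    have : w = p := Prod.ext hc.1 hc.2
    rw [this] at hw'
    omega
  simp only [pvAbsI]
  split_ifs <;> omega

theorem pvDmin_le_bound (grid : List (List Int)) (n1 n2 : Int) (w : Int × Int)
    (hw : w ∈ pvCellsOf grid n1 n2 0) (hL : pvCellsOf grid n1 n2 1 ≠ []) :
    pvDmin grid n1 n2 w ≤ n1 + n2 - 2 := by
  obtain ⟨⟨p, hp, hpe⟩, -⟩ := pvDmin_spec grid n1 n2 w hL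
  rw [← hpe]
  have hw' := (mem_pvCellsOf grid n1 n2 0 w).mp hw
  have hp' := (mem_pvCellsOf grid n1 n2 1 p).mp hp
  simp only [pvAbsI]
  split_ifs <;> omega

-- one elimination round of A's while loop = tightening the dmin threshold by one
theorem filter_step (grid : List (List Int)) (n1 n2 : Int) (d : Int) (hd : 1 ≤ d)
    (hL : pvCellsOf grid n1 n2 1 ≠ []) :
    ((pvCellsOf grid n1 n2 0).filter (fun w => decide (d ≤ pvDmin grid n1 n2 w))).filter
        (fun e => !((pvRing e d).any (pvLandAt grid n1 n2))) =
      (pvCellsOf grid n1 n2 0).filter (fun w => decide (d + 1 ≤ pvDmin grid n1 n2 w)) := by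
  rw [List.filter_filter]
  apply List.filter_congr
  intro w hw
  obtain ⟨⟨p, hp, hpe⟩, hmin⟩ := pvDmin_spec grid n1 n2 w hL
  by_cases h1 : d ≤ pvDmin grid n1 n2 w
  · by_cases h2 : d + 1 ≤ pvDmin grid n1 n2 w
    · have hany : (pvRing w d).any (pvLandAt grid n1 n2) = false := by
        rw [← Bool.not_eq_true, any_ring_iff grid n1 n2 w d (by omega)]
        rintro ⟨q, hq, hqd⟩
        have := hmin q hq
        omega
      simp [hany, h1, h2]
    · have heq : pvDmin grid n1 n2 w = d := by omega
      have hany : (pvRing w d).any (pvLandAt grid n1 n2) = true := by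
        rw [any_ring_iff grid n1 n2 w d (by omega)]
        exact ⟨p, hp, by omega⟩
      simp [hany, h1, h2]
  · have h2 : ¬ (d + 1 ≤ pvDmin grid n1 n2 w) := by omega
    simp [h1, h2]

-- A's while loop, started at threshold d, returns the maximal dmin D
theorem pvLoopA_eq (grid : List (List Int)) (n1 n2 D : Int)
    (hL : pvCellsOf grid n1 n2 1 ≠ [])
    (hDmem : ∃ w ∈ pvCellsOf grid n1 n2 0, pvDmin grid n1 n2 w = D)
    (hDmax : ∀ w ∈ pvCellsOf grid n1 n2 0, pvDmin grid n1 n2 w ≤ D) :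
    ∀ (f : Nat) (d : Int), 1 ≤ d → d ≤ D + 1 → (D + 1 - d).toNat < f →
      pvLoopA grid n1 n2 f
        ((pvCellsOf grid n1 n2 0).filter (fun w => decide (d ≤ pvDmin grid n1 n2 w))) d = D := by
  intro f
  induction f with
  | zero => intro d _ _ hf; omega
  | succ f ih =>
    intro d hd1 hd2 hf
    by_cases hcase : d ≤ D
    · obtain ⟨w, hw, hwD⟩ := hDmem
      have hqne : (pvCellsOf grid n1 n2 0).filter
          (fun w => decide (d ≤ pvDmin grid n1 n2 w)) ≠ [] := by
        intro hnil
        have : w ∈ (pvCellsOf grid n1 n2 0).filter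
            (fun w => decide (d ≤ pvDmin grid n1 n2 w)) :=
          List.mem_filter.mpr ⟨hw, by simp; omega⟩
        rw [hnil] at this
        exact absurd this (List.not_mem_nil)
      have hlen : ((pvCellsOf grid n1 n2 0).filter
          (fun w => decide (d ≤ pvDmin grid n1 n2 w))).length > 0 :=
        List.length_pos_iff.mpr hqne
      rw [pvLoopA, if_pos hlen, filter_step grid n1 n2 d hd1 hL]
      exact ih (d + 1) (by omega) (by omega) (by omega)
    · have hq : (pvCellsOf grid n1 n2 0).filter
          (fun w => decide (d ≤ pvDmin grid n1 n2 w)) = [] := by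
        apply List.filter_eq_nil_iff.mpr
        intro w hw
        have := hDmax w hw
        simp
        omega
      rw [pvLoopA, hq]
      simp
      omega

-- A's initial queue is exactly B's water list
theorem q0_eq_water (grid : List (List Int)) (n1 n2 : Int) :
    ((PySem.List.pyRange 0 n1 1).foldl (fun acc i =>
        (PySem.List.pyRange 0 n2 1).foldl (fun acc j =>
          if pvCell grid i j = 0 then acc ++ [(i, j)] else acc) acc) []) =
      pvCellsOf grid n1 n2 0 := by
  have hinner : ∀ (i : Int) (acc : List (Int × Int)),
      (PySem.List.pyRange 0 n2 1).foldl (fun acc j =>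
          if pvCell grid i j = 0 then acc ++ [(i, j)] else acc) acc =
        acc ++ ((PySem.List.pyRange 0 n2 1).filter
          (fun j => pvCell grid i j == 0)).map (fun j => (i, j)) := by
    intro i acc
    rw [PySem.List.foldl_append_ite (fun j => pvCell grid i j = 0) (fun j => (i, j))]
    congr 1
  calc ((PySem.List.pyRange 0 n1 1).foldl (fun acc i =>
        (PySem.List.pyRange 0 n2 1).foldl (fun acc j =>
          if pvCell grid i j = 0 then acc ++ [(i, j)] else acc) acc) [])
      = (PySem.List.pyRange 0 n1 1).foldl (fun acc i =>
          acc ++ ((PySem.List.pyRange 0 n2 1).filter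
            (fun j => pvCell grid i j == 0)).map (fun j => (i, j))) [] := by
        apply PySem.List.foldl_congr_mem
        intro acc i _
        exact hinner i acc
    _ = pvCellsOf grid n1 n2 0 := by
        rw [PySem.List.foldl_append_eq_flatMap]
        rfl

-- pvCell at nonnegative indices is plain getD-indexing
theorem pvCell_eq_getD (grid : List (List Int)) (i j : Int) (hi : 0 ≤ i) (hj : 0 ≤ j) :
    pvCell grid i j = (grid.getD i.toNat []).getD j.toNat 0 := by
  unfold pvCell
  obtain ⟨a, rfl⟩ : ∃ a : Nat, i = (a : Int) := ⟨i.toNat, by omega⟩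
  obtain ⟨b, rfl⟩ : ∃ b : Nat, j = (b : Int) := ⟨j.toNat, by omega⟩
  rw [PySem.List.pyGetD_natCast, PySem.List.pyGetD_natCast]
  simp

-- ===== VERDICT (by name: the statement is the Claim_ definition above) =====
theorem maxDistance2_spec : Claim_equal_maxDistance2 := by
  intro grid _ hpre
  obtain ⟨hne, hrows, hdiv⟩ := hpre
  have hlen : 1 ≤ grid.length := List.length_pos_iff.mpr hne
  unfold Spec_maxDistance2 maxDistance2 maxDistance2_alt
  simp only []
  split_ifs with ht hW
  · rfl
  · -- water list empty: A's queue is empty, both return 0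
    obtain ⟨htprod, ht0⟩ := not_or.mp ht
    rw [q0_eq_water grid (grid.length : Int) ((grid.headD []).length : Int), hW]
    obtain ⟨f, hf⟩ : ∃ f, ((grid.length : Int) + ((grid.headD []).length : Int)).toNat = f + 1 :=
      ⟨((grid.length : Int) + ((grid.headD []).length : Int)).toNat - 1, by omega⟩
    rw [hf]
    simp [pvLoopA]
  · obtain ⟨htprod, ht0⟩ := not_or.mp ht
    rw [q0_eq_water grid (grid.length : Int) ((grid.headD []).length : Int)]
    -- land list is nonempty: Pre_'s termination clause
    obtain ⟨w, hw⟩ := List.exists_mem_of_ne_nil _ hW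
    have hw' := (mem_pvCellsOf grid _ _ 0 w).mp hw
    have hL : pvCellsOf grid (grid.length : Int) ((grid.headD []).length : Int) 1 ≠ [] := by
      have hwat : ∃ i < grid.length, ∃ j < (grid.headD []).length,
          (grid.getD i []).getD j 0 = 0 := by
        refine ⟨w.1.toNat, by omega, w.2.toNat, by omega, ?_⟩
        rw [← pvCell_eq_getD grid w.1 w.2 (by omega) (by omega)]
        exact hw'.2.2.2.2
      obtain ⟨i, hi, j, hj, hc⟩ := hdiv ht0 htprod hwat
      intro hnil
      have : ((i : Int), (j : Int)) ∈
          pvCellsOf grid (grid.length : Int) ((grid.headD []).length : Int) 1 := by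
        rw [mem_pvCellsOf]
        refine ⟨by omega, by omega, by omega, by omega, ?_⟩
        rw [pvCell_eq_getD grid _ _ (by omega) (by omega)]
        simpa using hc
      rw [hnil] at this
      exact absurd this (List.not_mem_nil)
    -- the maximum of B's per-water-cell distances
    have hmapne : (pvCellsOf grid (grid.length : Int) ((grid.headD []).length : Int) 0).map
        (pvDmin grid (grid.length : Int) ((grid.headD []).length : Int)) ≠ [] := by
      simpa using hW
    rcases hm : PySem.List.max? ((pvCellsOf grid (grid.length : Int)
        ((grid.headD []).length : Int) 0).map
        (pvDmin grid (grid.length : Int) ((grid.headD []).length : Int))) (fun x => x)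
        with _ | D
    · exact absurd ((PySem.List.max?_eq_none_iff _ _).mp hm) hmapne
    have hDmax : ∀ v ∈ pvCellsOf grid (grid.length : Int) ((grid.headD []).length : Int) 0,
        pvDmin grid (grid.length : Int) ((grid.headD []).length : Int) v ≤ D := by
      intro v hv
      exact PySem.List.max?_isMax hm _ (List.mem_map.mpr ⟨v, hv, rfl⟩)
    have hBval : (PySem.List.max? ((pvCellsOf grid (grid.length : Int)
        ((grid.headD []).length : Int) 0).map (fun w =>
        (PySem.List.min? ((pvCellsOf grid (grid.length : Int)
          ((grid.headD []).length : Int) 1).map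
          (fun l => pvAbsI (w.1 - l.1) + pvAbsI (w.2 - l.2))) (fun x => x)).getD 0))
        (fun x => x)).getD 0 = D := by
      rw [show (fun w : Int × Int =>
          (PySem.List.min? ((pvCellsOf grid (grid.length : Int)
            ((grid.headD []).length : Int) 1).map
            (fun l => pvAbsI (w.1 - l.1) + pvAbsI (w.2 - l.2))) (fun x => x)).getD 0) =
          pvDmin grid (grid.length : Int) ((grid.headD []).length : Int) from rfl]
      rw [hm]
      rfl
    rw [hBval]
    -- bounds on D
    obtain ⟨w0, hw0, hw0D⟩ := List.mem_map.mp (PySem.List.max?_mem hm)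
    have hD1 : 1 ≤ D := hw0D ▸ pvDmin_pos grid _ _ w0 hw0 hL
    have hDb : D ≤ (grid.length : Int) + ((grid.headD []).length : Int) - 2 :=
      hw0D ▸ pvDmin_le_bound grid _ _ w0 hw0 hL
    -- the initial queue is the threshold-1 filter
    have hq : pvCellsOf grid (grid.length : Int) ((grid.headD []).length : Int) 0 =
        (pvCellsOf grid (grid.length : Int) ((grid.headD []).length : Int) 0).filter
          (fun w => decide (1 ≤ pvDmin grid (grid.length : Int)
            ((grid.headD []).length : Int) w)) := by
      symm
      apply List.filter_eq_self.mpr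
      intro v hv
      have := pvDmin_pos grid _ _ v hv hL
      simpa using this
    rw [hq]
    exact pvLoopA_eq grid _ _ D hL ⟨w0, hw0, hw0D⟩ hDmax _ 1 (by omega) (by omega) (by omega)
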